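-- pv_equiv track=rewrite | github.com/Landcruiser87/Capstone_Project | analysis/zg_layer_generator_01.py | Invalid_Conv1D
-- ===== SOURCE A (Python) =====
-- def Invalid_Conv1D(model):
-- 	conv1d_indices = [i for i,d in enumerate(model) if d == 'Conv1D']
--
-- 	if len(conv1d_indices) > 0:
-- 		#No RNN style before it
-- 		gru_indices = [i for i,d in enumerate(model) if d == 'GRU']
-- 		for ci in conv1d_indices:
-- 			if len([fi for fi in gru_indices if fi < ci]) > 0:
-- 				return True
--
-- 		lstm_indices = [i for i,d in enumerate(model) if d == 'LSTM']
-- 		for ci in conv1d_indices: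
-- 			if len([fi for fi in lstm_indices if fi < ci]) > 0:
-- 				return True
--
-- 		blstm_indices = [i for i,d in enumerate(model) if d == 'BidirectionalLSTM']
-- 		for ci in conv1d_indices:
-- 			if len([fi for fi in blstm_indices if fi < ci]) > 0:
-- 				return True
--
-- 		bgru_indices = [i for i,d in enumerate(model) if d == 'BidirectionalGRU']
-- 		for ci in conv1d_indices:
-- 			if len([fi for fi in bgru_indices if fi < ci]) > 0:
-- 				return True
--
-- 		#No flatten before it
-- 		flatten_indices = [i for i,d in enumerate(model) if d == 'Flatten']
-- 		for ci in conv1d_indices: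
-- 			if len([fi for fi in flatten_indices if fi < ci]) > 0:
-- 				return True
--
-- 		#Must have at least one flatten
-- 		if len(flatten_indices) == 0:
-- 			return True
--
-- 		#No dense before it
-- 		dense_indices = [i for i,d in enumerate(model) if d == 'Dense']
-- 		for ci in conv1d_indices:
-- 			if len([di for di in dense_indices if di < ci]) > 0:
-- 				return True
--
-- 		#Conv1D, MaxPooling1D, Dropout, Flatten, Dense
--
-- 	return False
-- ===== SOURCE B (Python) =====
-- FORBIDDEN = ('GRU', 'LSTM', 'BidirectionalLSTM', 'BidirectionalGRU', 'Flatten', 'Dense')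
--
-- def Invalid_Conv1D(model):
--     seen_forbidden = False
--     has_conv = False
--     has_flatten = False
--     for d in model:
--         if d == 'Conv1D':
--             if seen_forbidden:
--                 return True
--             has_conv = True
--         elif d in FORBIDDEN:
--             seen_forbidden = True
--             if d == 'Flatten':
--                 has_flatten = True
--     return has_conv and not has_flatten
-- ===== Notes on version B (the rewrite author's own statement) =====
-- stated objective: alternative
-- what changed: Replaced six enumerate-and-filter index passes with nested per-Conv1D scans by one single early-exiting pass that tracks whether a forbidden layer has been seen, returns True at the first Conv1D following one, and accumulates has-Conv1D/has-Flatten flags for the final check.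
import Mathlib
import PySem

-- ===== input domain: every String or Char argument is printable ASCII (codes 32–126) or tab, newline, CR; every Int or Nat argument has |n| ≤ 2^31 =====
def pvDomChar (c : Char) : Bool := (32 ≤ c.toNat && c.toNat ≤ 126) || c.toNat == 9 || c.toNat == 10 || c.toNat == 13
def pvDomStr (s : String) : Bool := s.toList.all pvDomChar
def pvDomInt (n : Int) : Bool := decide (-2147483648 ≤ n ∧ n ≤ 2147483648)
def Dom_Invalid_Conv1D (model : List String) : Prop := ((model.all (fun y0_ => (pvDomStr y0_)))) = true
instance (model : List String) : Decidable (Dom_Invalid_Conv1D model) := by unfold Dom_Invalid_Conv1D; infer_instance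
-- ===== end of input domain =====

-- B replaces A's six enumerate-index passes with nested per-Conv1D scans by one single early-exiting pass over the layer list (objective: alternative).

-- ===== PORT A =====
def Invalid_Conv1D (model : List String) : Bool :=
  let conv1d_indices := ((PySem.List.enumerate model).filter (fun p => p.2 == "Conv1D")).map (·.1)
  if conv1d_indices.length > 0 then
    let gru_indices := ((PySem.List.enumerate model).filter (fun p => p.2 == "GRU")).map (·.1)
    if conv1d_indices.any (fun ci => decide (0 < ((gru_indices.filter (fun fi => decide (fi < ci))).length))) then
      true
    else
      let lstm_indices := ((PySem.List.enumerate model).filter (fun p => p.2 == "LSTM")).map (·.1)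
      if conv1d_indices.any (fun ci => decide (0 < ((lstm_indices.filter (fun fi => decide (fi < ci))).length))) then
        true
      else
        let blstm_indices := ((PySem.List.enumerate model).filter (fun p => p.2 == "BidirectionalLSTM")).map (·.1)
        if conv1d_indices.any (fun ci => decide (0 < ((blstm_indices.filter (fun fi => decide (fi < ci))).length))) then
          true
        else
          let bgru_indices := ((PySem.List.enumerate model).filter (fun p => p.2 == "BidirectionalGRU")).map (·.1)
          if conv1d_indices.any (fun ci => decide (0 < ((bgru_indices.filter (fun fi => decide (fi < ci))).length))) then
            true
          else
            let flatten_indices := ((PySem.List.enumerate model).filter (fun p => p.2 == "Flatten")).map (·.1)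
            if conv1d_indices.any (fun ci => decide (0 < ((flatten_indices.filter (fun fi => decide (fi < ci))).length))) then
              true
            else
              if flatten_indices.length == 0 then
                true
              else
                let dense_indices := ((PySem.List.enumerate model).filter (fun p => p.2 == "Dense")).map (·.1)
                if conv1d_indices.any (fun ci => decide (0 < ((dense_indices.filter (fun di => decide (di < ci))).length))) then
                  true
                else
                  false
  else
    false

-- ===== PORT B =====
def pvForbidden : List String := ["GRU", "LSTM", "BidirectionalLSTM", "BidirectionalGRU", "Flatten", "Dense"]

-- the for-loop of Source B: early return True; otherwise carries (seen_forbidden, has_conv, has_flatten)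
def pvLoop (seenF hasConv hasFlat : Bool) (l : List String) : Bool :=
  match l with
  | [] => hasConv && !hasFlat
  | d :: xs =>
    if d == "Conv1D" then
      if seenF then true else pvLoop seenF true hasFlat xs
    else if pvForbidden.contains d then
      pvLoop true hasConv (if d == "Flatten" then true else hasFlat) xs
    else
      pvLoop seenF hasConv hasFlat xs

def Invalid_Conv1D_alt (model : List String) : Bool := pvLoop false false false model

-- ===== PRECONDITION & SPEC =====
def Spec_Invalid_Conv1D (model : List String) (out : Bool) : Prop := out = Invalid_Conv1D_alt model
instance (model : List String) (out : Bool) : Decidable (Spec_Invalid_Conv1D model out) := by unfold Spec_Invalid_Conv1D; infer_instance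

-- ===== CLAIM (what is proved, stated in full; the proofs are below) =====
def Claim_equal_Invalid_Conv1D : Prop := ∀ (model : List String), Dom_Invalid_Conv1D model → Spec_Invalid_Conv1D model (Invalid_Conv1D model)

-- ===== LEMMAS AND PROOFS =====

-- indices of the occurrences of d in l, counting from s (A's comprehension, generalized start)
def idxs (d : String) (s : Int) (l : List String) : List Int :=
  ((PySem.List.enumerate l s).filter (fun p => p.2 == d)).map (·.1)

-- "some occurrence of f strictly before some occurrence of Conv1D"
def bef (f : String) (l : List String) : Bool :=
  match l with
  | [] => false
  | x :: xs => (x == f && xs.any (· == "Conv1D")) || bef f xs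

theorem idxs_nil (d : String) (s : Int) : idxs d s [] = [] := rfl

theorem idxs_cons (d : String) (s : Int) (x : String) (xs : List String) :
    idxs d s (x :: xs) = (if x == d then [s] else []) ++ idxs d (s + 1) xs := by
  by_cases h : x = d <;> simp [idxs, PySem.List.enumerate_cons, h]


theorem mem_idxs_ge {d : String} {s : Int} {l : List String} {i : Int}
    (h : i ∈ idxs d s l) : s ≤ i := by
  simp only [idxs, List.mem_map, List.mem_filter] at h
  obtain ⟨p, ⟨hp, _⟩, rfl⟩ := h
  rw [PySem.List.mem_enumerate_iff] at hp
  obtain ⟨k, hk, rfl⟩ := hp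
  simp

theorem idxs_eq_nil_iff (d : String) (s : Int) (l : List String) :
    (idxs d s l = []) ↔ (l.any (· == d) = false) := by
  induction l generalizing s with
  | nil => simp [idxs_nil]
  | cons x xs ih =>
    by_cases h : x = d <;> simp [idxs_cons, h, ih]

theorem bef_imp_any {f : String} {l : List String} (h : bef f l = true) :
    l.any (· == "Conv1D") = true := by
  induction l with
  | nil => simp [bef] at h
  | cons x xs ih =>
    simp only [bef, Bool.or_eq_true, Bool.and_eq_true] at h
    rcases h with ⟨_, h2⟩ | h
    · simp [h2]
    · simp [ih h]

theorem any_idxs_eq_bef (f : String) (hf : (f == "Conv1D") = false) (l : List String) (s : Int) :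
    ((idxs "Conv1D" s l).any (fun ci =>
        decide (0 < (((idxs f s l).filter (fun fi => decide (fi < ci))).length)))) = bef f l := by
  induction l generalizing s with
  | nil => simp [idxs_nil, bef]
  | cons x xs ih =>
    by_cases hx : x = "Conv1D"
    · have hxf : (x == f) = false := by
        subst hx
        simp only [beq_eq_false_iff_ne] at hf ⊢
        exact fun h => hf h.symm
      have hconvl : idxs "Conv1D" s (x :: xs) = s :: idxs "Conv1D" (s + 1) xs := by
        rw [idxs_cons]; simp [hx]
      have hflist : idxs f s (x :: xs) = idxs f (s + 1) xs := by
        rw [idxs_cons]; simp [hxf]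
      have hfilt : (idxs f (s + 1) xs).filter (fun fi => decide (fi < s)) = [] := by
        rw [List.filter_eq_nil_iff]
        intro a ha
        have := mem_idxs_ge ha
        simp only [decide_eq_true_eq]
        omega
      have hbef : bef f (x :: xs) = bef f xs := by simp [bef, hxf]
      have hz : (decide (0 < (((idxs f (s + 1) xs).filter (fun fi => decide (fi < s))).length))) = false := by
        rw [hfilt]; rfl
      rw [hconvl, hflist, hbef, List.any_cons, hz, Bool.false_or]
      exact ih (s := s + 1)
    · have hxc : (x == "Conv1D") = false := by simp [hx]
      have hconvl : idxs "Conv1D" s (x :: xs) = idxs "Conv1D" (s + 1) xs := by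
        rw [idxs_cons]; simp [hxc]
      by_cases hxf : x = f
      · have hfx : (x == f) = true := by simp [hxf]
        have hflist : idxs f s (x :: xs) = s :: idxs f (s + 1) xs := by
          rw [idxs_cons]; simp [hfx]
        have hbef : bef f (x :: xs) = (xs.any (· == "Conv1D") || bef f xs) := by
          simp [bef, hfx]
        rw [hconvl, hflist, hbef]
        have habs : (xs.any (· == "Conv1D") || bef f xs) = xs.any (· == "Conv1D") := by
          cases hb : bef f xs
          · simp
          · simp [bef_imp_any hb]
        rw [habs]
        cases hconv : xs.any (· == "Conv1D")
        · have : idxs "Conv1D" (s + 1) xs = [] := (idxs_eq_nil_iff _ _ _).mpr hconv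
          simp [this]
        · have hne : idxs "Conv1D" (s + 1) xs ≠ [] := by
            intro h0
            rw [idxs_eq_nil_iff, hconv] at h0
            exact Bool.true_eq_false.mp h0
          obtain ⟨ci, hci⟩ := List.exists_mem_of_ne_nil _ hne
          have hsci : s < ci := by have := mem_idxs_ge hci; omega
          rw [List.any_eq_true]
          exact ⟨ci, hci, by simp [hsci]⟩
      · have hfx : (x == f) = false := by simp [hxf]
        have hflist : idxs f s (x :: xs) = idxs f (s + 1) xs := by
          rw [idxs_cons]; simp [hfx]
        have hbef : bef f (x :: xs) = bef f xs := by simp [bef, hfx]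
        rw [hconvl, hflist, hbef]
        exact ih (s := s + 1)

theorem len_pos_iff_any (d : String) (l : List String) :
    (0 < (idxs d 0 l).length) ↔ (l.any (· == d) = true) := by
  rcases h : l.any (· == d) with _ | _
  · have := (idxs_eq_nil_iff d 0 l).mpr h
    simp [this]
  · constructor
    · intro; rfl
    · intro
      rcases h2 : idxs d 0 l with _ | ⟨a, t⟩
      · rw [idxs_eq_nil_iff, h] at h2
        exact absurd h2 (by simp)
      · simp

-- A's per-type scan, named
def anyb (f : String) (l : List String) : Bool :=
  (idxs "Conv1D" 0 l).any (fun ci =>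
    decide (0 < (((idxs f 0 l).filter (fun fi => decide (fi < ci))).length)))

theorem A_unfold (l : List String) :
    Invalid_Conv1D l =
      (if (idxs "Conv1D" 0 l).length > 0 then
        if anyb "GRU" l then true
        else if anyb "LSTM" l then true
        else if anyb "BidirectionalLSTM" l then true
        else if anyb "BidirectionalGRU" l then true
        else if anyb "Flatten" l then true
        else if (idxs "Flatten" 0 l).length == 0 then true
        else if anyb "Dense" l then true
        else false
      else false) := rfl

-- A in closed form
theorem A_norm (l : List String) :
    Invalid_Conv1D l =
      (l.any (· == "Conv1D") &&
        (bef "GRU" l || bef "LSTM" l || bef "BidirectionalLSTM" l || bef "BidirectionalGRU" l ||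
         bef "Flatten" l || !(l.any (· == "Flatten")) || bef "Dense" l)) := by
  rw [A_unfold]
  rw [show anyb "GRU" l = bef "GRU" l from any_idxs_eq_bef "GRU" rfl l 0,
      show anyb "LSTM" l = bef "LSTM" l from any_idxs_eq_bef "LSTM" rfl l 0,
      show anyb "BidirectionalLSTM" l = bef "BidirectionalLSTM" l from
        any_idxs_eq_bef "BidirectionalLSTM" rfl l 0,
      show anyb "BidirectionalGRU" l = bef "BidirectionalGRU" l from
        any_idxs_eq_bef "BidirectionalGRU" rfl l 0,
      show anyb "Flatten" l = bef "Flatten" l from any_idxs_eq_bef "Flatten" rfl l 0,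
      show anyb "Dense" l = bef "Dense" l from any_idxs_eq_bef "Dense" rfl l 0]
  by_cases hc : l.any (· == "Conv1D") = true
  · have hlen : 0 < (idxs "Conv1D" 0 l).length := (len_pos_iff_any _ _).mpr hc
    by_cases hfl : l.any (· == "Flatten") = true
    · have hflen : ¬ ((idxs "Flatten" 0 l).length = 0) := by
        have := (len_pos_iff_any "Flatten" l).mpr hfl
        omega
      simp [hlen, hflen, hc, hfl, Bool.or_assoc]
    · have hfl' : l.any (· == "Flatten") = false := Bool.eq_false_iff.mpr hfl
      have hflen : (idxs "Flatten" 0 l).length = 0 := by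
        have := (idxs_eq_nil_iff "Flatten" 0 l).mpr hfl'
        simp [this]
      simp [hlen, hflen, hc, hfl', Bool.or_assoc]
  · have hc' : l.any (· == "Conv1D") = false := Bool.eq_false_iff.mpr hc
    have hlen : (idxs "Conv1D" 0 l).length = 0 := by
      have := (idxs_eq_nil_iff "Conv1D" 0 l).mpr hc'
      simp [this]
    simp [hlen, hc']

-- B's single pass, characterized
def badIn (l : List String) : Bool :=
  match l with
  | [] => false
  | x :: xs => (pvForbidden.contains x && xs.any (· == "Conv1D")) || badIn xs

theorem badIn_imp_any {l : List String} (h : badIn l = true) :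
    l.any (· == "Conv1D") = true := by
  induction l with
  | nil => simp [badIn] at h
  | cons x xs ih =>
    simp only [badIn, Bool.or_eq_true, Bool.and_eq_true] at h
    rcases h with ⟨_, h2⟩ | h
    · simp [h2]
    · simp [ih h]

theorem pvLoop_eq (l : List String) (seenF hasConv hasFlat : Bool) :
    pvLoop seenF hasConv hasFlat l =
      (((seenF && l.any (· == "Conv1D")) || badIn l) ||
       ((hasConv || l.any (· == "Conv1D")) && !(hasFlat || l.any (· == "Flatten")))) := by
  induction l generalizing seenF hasConv hasFlat with
  | nil => simp [pvLoop, badIn]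
  | cons x xs ih =>
    simp only [List.any_cons, badIn]
    by_cases hx : x = "Conv1D"
    · have hnm : x ∉ pvForbidden := by subst hx; decide
      have hxfl : (x == "Flatten") = false := by subst hx; decide
      rw [show pvLoop seenF hasConv hasFlat (x :: xs) =
          (if seenF then true else pvLoop seenF true hasFlat xs) by simp [pvLoop, hx]]
      cases seenF
      · rw [if_neg (by simp), ih]
        simp [hx, show "Conv1D" ∉ pvForbidden by decide]
      · simp [hx]
    · have hxc : (x == "Conv1D") = false := by simp [hx]
      by_cases hf : pvForbidden.contains x = true
      · have hm : x ∈ pvForbidden := by simpa using hf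
        rw [show pvLoop seenF hasConv hasFlat (x :: xs) =
            pvLoop true hasConv (if x == "Flatten" then true else hasFlat) xs by
          simp [pvLoop, hxc, hm]]
        rw [ih]
        simp only [hxc, Bool.false_or, Bool.true_and]
        cases hq : x == "Flatten" <;> cases seenF <;> cases hasFlat <;>
          cases ha : xs.any (· == "Conv1D") <;> simp [ha, hm, hq]
      · have hn : x ∉ pvForbidden := by simpa using Bool.eq_false_iff.mpr hf
        have hxfl : (x == "Flatten") = false := by
          have hne : x ≠ "Flatten" := by
            intro h; subst h; exact hf (by decide)
          simp [hne]
        rw [show pvLoop seenF hasConv hasFlat (x :: xs) = pvLoop seenF hasConv hasFlat xs by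
          simp [pvLoop, hxc, hn]]
        rw [ih]
        simp [hxc, hn, hxfl]

theorem badIn_eq (l : List String) :
    badIn l = (bef "GRU" l || bef "LSTM" l || bef "BidirectionalLSTM" l ||
               bef "BidirectionalGRU" l || bef "Flatten" l || bef "Dense" l) := by
  induction l with
  | nil => simp [badIn, bef]
  | cons x xs ih =>
    simp only [badIn, bef, ih]
    have hc : pvForbidden.contains x =
        ((x == "GRU") || (x == "LSTM") || (x == "BidirectionalLSTM") ||
         (x == "BidirectionalGRU") || (x == "Flatten") || (x == "Dense")) := by
      simp [pvForbidden, Bool.or_assoc]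
      rfl
    rw [hc]
    cases x == "GRU" <;> cases x == "LSTM" <;> cases x == "BidirectionalLSTM" <;>
      cases x == "BidirectionalGRU" <;> cases x == "Flatten" <;> cases x == "Dense" <;>
      cases xs.any (· == "Conv1D") <;> simp

theorem B_norm (l : List String) :
    Invalid_Conv1D_alt l =
      (l.any (· == "Conv1D") && (badIn l || !(l.any (· == "Flatten")))) := by
  simp only [Invalid_Conv1D_alt]
  rw [pvLoop_eq]
  cases hb : badIn l
  · simp
  · simp [badIn_imp_any hb]

-- ===== VERDICT (by name: the statement is the Claim_ definition above) =====
theorem Invalid_Conv1D_spec : Claim_equal_Invalid_Conv1D := by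
  intro model _
  show Invalid_Conv1D model = Invalid_Conv1D_alt model
  rw [A_norm, B_norm, badIn_eq]
  cases model.any (· == "Conv1D") <;> cases model.any (· == "Flatten") <;>
    cases bef "GRU" model <;> cases bef "LSTM" model <;> cases bef "BidirectionalLSTM" model <;>
    cases bef "BidirectionalGRU" model <;> cases bef "Flatten" model <;> cases bef "Dense" model <;>
    simp
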